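-- pv_equiv track=rewrite | github.com/njeanselme/feed-to-csp | 3-dedup-iocs-to-db.py | generate_petal_labels
-- ===== SOURCE A (Python) =====
-- def generate_logics(n_sets):
--     """Generate intersection identifiers in binary (0010 etc)"""
--     for i in range(1, 2**n_sets):
--         yield bin(i)[2:].zfill(n_sets)
--
-- def generate_petal_labels(datasets):
--     datasets = list(datasets)
--     n_sets = len(datasets)
--     dataset_union = set.union(*datasets)
--     universe_size = len(dataset_union)
--     petal_labels = {}
--     petal_sets = {}
--     for logic in generate_logics(n_sets):
--         included_sets = [
--             datasets[i] for i in range(n_sets) if logic[i] == "1"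
--         ]
--         excluded_sets = [
--             datasets[i] for i in range(n_sets) if logic[i] == "0"
--         ]
--         petal_set = (
--             (dataset_union & set.intersection(*included_sets)) -
--             set.union(set(), *excluded_sets)
--         )
--         petal_labels[logic] = logic
--         petal_sets[logic]=petal_set
--
--     return petal_sets
-- ===== SOURCE B (Python) =====
-- def generate_petal_labels(datasets):
--     # One pass over the union computes each element's membership signature: only
--     # signatures that occur name nonempty petals, so the set algebra runs for at
--     # most len(dataset_union) of the 2**n_sets - 1 petals; the rest are empty.
--     datasets = list(datasets)
--     n_sets = len(datasets)
--     dataset_union = set.union(*datasets)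
--     present = {
--         "".join("1" if x in datasets[j] else "0" for j in range(n_sets))
--         for x in dataset_union
--     }
--     petal_sets = {}
--     for i in range(1, 2 ** n_sets):
--         logic = bin(i)[2:].zfill(n_sets)
--         if logic in present:
--             inter = None
--             excl = set()
--             for j, dataset in enumerate(datasets):
--                 if logic[j] == "1":
--                     inter = dataset if inter is None else inter & dataset
--                 else:
--                     excl |= dataset
--             petal_sets[logic] = (dataset_union & inter) - excl
--         else:
--             petal_sets[logic] = set()
--     return petal_sets
-- ===== Notes on version B (the rewrite author's own statement) =====
-- stated objective: alternative
-- what changed: A runs the intersection/difference set algebra for every one of the 2^n-1 petals; B computes each union element's membership signature in one pass, so the set algebra runs only for the at most |union| signatures that actually occur and every other petal is returned empty without any set operation.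
import Mathlib
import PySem

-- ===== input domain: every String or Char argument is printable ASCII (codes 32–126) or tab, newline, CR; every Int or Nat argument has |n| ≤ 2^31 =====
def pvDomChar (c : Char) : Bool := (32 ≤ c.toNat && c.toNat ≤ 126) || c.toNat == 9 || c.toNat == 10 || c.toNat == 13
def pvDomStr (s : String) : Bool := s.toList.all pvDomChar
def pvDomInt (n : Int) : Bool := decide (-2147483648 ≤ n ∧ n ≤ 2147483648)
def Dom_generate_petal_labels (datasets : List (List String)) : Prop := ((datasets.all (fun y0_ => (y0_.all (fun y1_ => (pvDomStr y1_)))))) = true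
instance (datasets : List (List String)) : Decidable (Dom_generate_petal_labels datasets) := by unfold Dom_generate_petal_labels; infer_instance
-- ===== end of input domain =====

-- B replaces A's per-petal set algebra (intersection/difference for each of the 2^n-1 petals)
-- by one pass over the union that buckets every element into the single petal named by its
-- membership signature (alternative algorithm, same results).

-- ===== PORT A =====
-- port of generate_logics(n_sets): bin(i)[2:].zfill(n_sets) for i in range(1, 2**n_sets)
def pvLogics (n : Nat) : List String :=
  (PySem.List.pyRange 1 (2 ^ n) 1).map (fun i => PySem.Str.zfill (PySem.Int.toBin i) (n : Int))

-- set.union(*sets) with a first set: sets[0] | sets[1] | …; [] is unreachable (Pre_: datasets ≠ [])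
def pvUnionAll (sets : List (List String)) : PySem.Set String :=
  match sets with
  | [] => []
  | d :: rest => rest.foldl (fun a b => PySem.Set.union a b) (PySem.Set.ofList d)

-- set.intersection(*included_sets); [] is unreachable (every generated logic contains a '1')
def pvInterAll (sets : List (List String)) : PySem.Set String :=
  match sets with
  | [] => []
  | s :: rest => rest.foldl (fun a b => PySem.Set.inter a b) (PySem.Set.ofList s)

-- one loop-body of A: the petal set for one logic string
def pvPetalA (datasets : List (List String)) (logic : String) : List String :=
  let n := datasets.length
  let included := ((PySem.List.pyRange 0 (n : Int) 1).filter
      (fun i => PySem.Str.pyGet? logic i == some '1')).map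
      (fun i => PySem.List.pyGetD datasets i [])
  let excluded := ((PySem.List.pyRange 0 (n : Int) 1).filter
      (fun i => PySem.Str.pyGet? logic i == some '0')).map
      (fun i => PySem.List.pyGetD datasets i [])
  PySem.Set.diff (PySem.Set.inter (pvUnionAll datasets) (pvInterAll included))
    (excluded.foldl (fun a b => PySem.Set.union a b) PySem.Set.empty)

-- A's unused petal_labels dict and universe_size are dropped (dead code in A)
def generate_petal_labels (datasets : List (List String)) : List (String × List String) :=
  ((pvLogics datasets.length).foldl
    (fun d logic => d.insert logic (pvPetalA datasets logic)) PySem.Dict.empty).items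


-- ===== PORT B =====
-- ''.join('1' if x in datasets[j] else '0' for j in range(n_sets)): x's membership signature
def pvSigB (datasets : List (List String)) (x : String) : String :=
  String.ofList ((PySem.List.pyRange 0 (datasets.length : Int) 1).map
    (fun i => if PySem.Set.contains (PySem.List.pyGetD datasets i []) x then '1' else '0'))

-- {signature(x) for x in dataset_union}; iterating the union Set only to build another
-- Set is order-safe.  Both Pythons spell dataset_union the same way (set.union(*datasets)),
-- hence the shared pvUnionAll.
def pvPresent (datasets : List (List String)) : PySem.Set String :=
  (pvUnionAll datasets).foldl (fun s x => PySem.Set.add s (pvSigB datasets x)) PySem.Set.empty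

-- body of B's inner 'for j, dataset in enumerate(datasets)' loop: inter stays None until the
-- first '1' position, excl accumulates the other datasets
def pvStepB (logic : String) (st : Option (PySem.Set String) × PySem.Set String)
    (p : Int × List String) : Option (PySem.Set String) × PySem.Set String :=
  if PySem.Str.pyGet? logic p.1 == some '1' then
    (some (match st.1 with
           | none => p.2
           | some s => PySem.Set.inter s p.2), st.2)
  else
    (st.1, PySem.Set.union st.2 p.2)

-- (dataset_union & inter) - excl; inter = none is unreachable here (pvPetalB is only called
-- on generated logic strings, which contain a '1'; Python's U & None would raise there)
def pvPetalB (datasets : List (List String)) (logic : String) : List String :=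
  let st := (PySem.List.enumerate datasets).foldl (pvStepB logic) (none, PySem.Set.empty)
  match st.1 with
  | some inter => PySem.Set.diff (PySem.Set.inter (pvUnionAll datasets) inter) st.2
  | none => []

def generate_petal_labels_alt (datasets : List (List String)) : List (String × List String) :=
  ((PySem.List.pyRange 1 (2 ^ datasets.length) 1).foldl
    (fun d i =>
      let logic := PySem.Str.zfill (PySem.Int.toBin i) (datasets.length : Int)
      d.insert logic
        (if PySem.Set.contains (pvPresent datasets) logic then pvPetalB datasets logic
         else PySem.Set.empty))
    PySem.Dict.empty).items

-- ===== PRECONDITION & SPEC =====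
-- on an empty datasets list set.union(*datasets) gets no argument and raises TypeError (in A and in B); excluded
def Pre_generate_petal_labels (datasets : List (List String)) : Prop := datasets ≠ []
instance (datasets : List (List String)) : Decidable (Pre_generate_petal_labels datasets) := by unfold Pre_generate_petal_labels; infer_instance
def pvWitness_generate_petal_labels : List (List String) := [["a"]]

def Spec_generate_petal_labels (datasets : List (List String)) (out : List (String × List String)) : Prop := out = generate_petal_labels_alt datasets
instance (datasets : List (List String)) (out : List (String × List String)) : Decidable (Spec_generate_petal_labels datasets out) := by unfold Spec_generate_petal_labels; infer_instance

-- ===== CLAIM (what is proved, stated in full; the proofs are below) =====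
def Claim_equal_generate_petal_labels : Prop := ∀ (datasets : List (List String)), Dom_generate_petal_labels datasets → Pre_generate_petal_labels datasets → Spec_generate_petal_labels datasets (generate_petal_labels datasets)

-- ===== LEMMAS AND PROOFS =====

theorem pv_foldl_union (l : List (List String)) (s : PySem.Set String) :
    l.foldl (fun a b => PySem.Set.union a b) s = PySem.Set.update s l.flatten := by
  induction l generalizing s with
  | nil => rw [List.foldl_nil, List.flatten_nil, PySem.Set.update_nil]
  | cons d rest ih =>
    rw [List.foldl_cons, ih (PySem.Set.union s d), List.flatten_cons, PySem.Set.update_append]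
    rfl

theorem pv_unionAll_eq_dedup (d : List String) (rest : List (List String)) :
    pvUnionAll (d :: rest) = PySem.List.dedup (d :: rest).flatten := by
  simp [pvUnionAll, pv_foldl_union, PySem.List.dedup_eq_ofList,
    PySem.Set.ofList_append]

theorem pv_mem_foldl_inter (l : List (List String)) (s : PySem.Set String) (x : String) :
    x ∈ l.foldl (fun a b => PySem.Set.inter a b) s ↔ x ∈ s ∧ ∀ t ∈ l, x ∈ t := by
  induction l generalizing s with
  | nil => simp
  | cons d rest ih =>
    simp only [List.foldl_cons, ih, PySem.Set.mem_inter, List.mem_cons]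
    constructor
    · rintro ⟨⟨hs, hd⟩, hrest⟩
      exact ⟨hs, fun t ht => ht.elim (fun h => h ▸ hd) (hrest t)⟩
    · rintro ⟨hs, hall⟩
      exact ⟨⟨hs, hall d (Or.inl rfl)⟩, fun t ht => hall t (Or.inr ht)⟩

theorem pv_mem_interAll (s : List String) (rest : List (List String)) (x : String) :
    x ∈ pvInterAll (s :: rest) ↔ ∀ t ∈ s :: rest, x ∈ t := by
  simp only [pvInterAll, pv_mem_foldl_inter, PySem.Set.mem_ofList, List.mem_cons]
  constructor
  · rintro ⟨hs, hall⟩ t ht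
    exact ht.elim (fun h => h ▸ hs) (hall t)
  · intro h
    exact ⟨h s (Or.inl rfl), fun t ht => h t (Or.inr ht)⟩

theorem pv_mem_foldl_union_empty (l : List (List String)) (x : String) :
    x ∈ l.foldl (fun a b => PySem.Set.union a b) PySem.Set.empty ↔ ∃ t ∈ l, x ∈ t := by
  rw [pv_foldl_union]
  simp [PySem.Set.empty, PySem.Set.update_nil_left, PySem.Set.mem_ofList, List.mem_flatten]

-- the character-level shape of a generated logic string
def pvGoodLogic (n : Nat) (L : List Char) : Prop :=
  L.length = n ∧ (∀ c ∈ L, c = '0' ∨ c = '1') ∧ '1' ∈ L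

theorem pv_toDigitsCore_chars (f : Nat) :
    ∀ (m : Nat) (acc : List Char) (c : Char), c ∈ Nat.toDigitsCore 2 f m acc →
      c ∈ acc ∨ c = '0' ∨ c = '1' := by
  induction f with
  | zero => intro m acc c h; exact Or.inl h
  | succ f ih =>
    intro m acc c h
    have hd : Nat.digitChar (m % 2) = '0' ∨ Nat.digitChar (m % 2) = '1' := by
      rcases Nat.mod_two_eq_zero_or_one m with h2 | h2 <;> simp [h2, Nat.digitChar]
    simp only [Nat.toDigitsCore] at h
    split at h
    · rw [List.mem_cons] at h
      rcases h with h | h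
      · exact Or.inr (h ▸ hd)
      · exact Or.inl h
    · rcases ih (m / 2) (Nat.digitChar (m % 2) :: acc) c h with h | h
      · rw [List.mem_cons] at h
        rcases h with h | h
        · exact Or.inr (h ▸ hd)
        · exact Or.inl h
      · exact Or.inr h

theorem pv_toDigitsCore_one_mem (f : Nat) :
    ∀ (m : Nat) (acc : List Char), 0 < m → m < 2 ^ f →
      '1' ∈ Nat.toDigitsCore 2 f m acc := by
  induction f with
  | zero => intro m acc hm hlt; omega
  | succ f ih =>
    intro m acc hm hlt
    simp only [Nat.toDigitsCore]
    split
    · rename_i h0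
      have : m = 1 := by omega
      simp [this, Nat.digitChar]
    · rename_i h0
      have h1 : 0 < m / 2 := Nat.pos_of_ne_zero h0
      have h2 : m / 2 < 2 ^ f := by
        rw [pow_succ] at hlt
        omega
      exact ih (m / 2) _ h1 h2

theorem pv_zfill_good (c : Char) (rest : List Char) (w : Int)
    (hchars : ∀ d ∈ c :: rest, d = '0' ∨ d = '1') (hone : '1' ∈ c :: rest) :
    (∀ d ∈ PySem.Chars.zfill (c :: rest) w, d = '0' ∨ d = '1') ∧
      '1' ∈ PySem.Chars.zfill (c :: rest) w := by
  have hz : PySem.Chars.zfill (c :: rest) w =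
      if w ≤ ((c :: rest).length : Int) then c :: rest
      else (if c = '+' ∨ c = '-' then
              c :: (List.replicate (w.toNat - (c :: rest).length) '0' ++ rest)
            else List.replicate (w.toNat - (c :: rest).length) '0' ++ (c :: rest)) := rfl
  have hc : ¬ (c = '+' ∨ c = '-') := by
    rcases hchars c (by simp) with h | h <;> subst h <;> decide
  rw [hz, if_neg hc]
  split
  · exact ⟨hchars, hone⟩
  · constructor
    · intro d hd
      rcases List.mem_append.mp hd with h | h
      · exact Or.inl (List.eq_of_mem_replicate h)
      · exact hchars d h
    · exact List.mem_append.mpr (Or.inr hone)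

theorem pv_good_of_mem_logics (n : Nat) (logic : String) (h : logic ∈ pvLogics n) :
    pvGoodLogic n logic.toList := by
  simp only [pvLogics, List.mem_map] at h
  obtain ⟨i, hi, heq⟩ := h
  rw [PySem.List.mem_pyRange_one] at hi
  have hn : 0 < n := by
    by_contra h0
    have hz : n = 0 := by omega
    rw [hz] at hi
    simp at hi
    omega
  have hipos : 0 < i.toNat := by omega
  have hilt : i.toNat < 2 ^ n := by
    have h2 := hi.2
    have hnn : (0 : Int) ≤ i := by omega
    rw [← Int.toNat_of_nonneg hnn] at h2
    exact_mod_cast h2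
  have hcs : Nat.toDigits 2 i.toNat = Nat.toDigitsCore 2 (i.toNat + 1) i.toNat [] := rfl
  have hchars : ∀ c ∈ Nat.toDigits 2 i.toNat, c = '0' ∨ c = '1' := by
    intro c hc
    rw [hcs] at hc
    rcases pv_toDigitsCore_chars _ _ _ _ hc with h | h
    · simp at h
    · exact h
  have hone : '1' ∈ Nat.toDigits 2 i.toNat := by
    rw [hcs]
    exact pv_toDigitsCore_one_mem _ _ _ hipos
      (lt_of_lt_of_le (Nat.lt_two_pow_self) (Nat.pow_le_pow_right (by norm_num) (Nat.le_succ _)))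
  have hlen : (Nat.toDigits 2 i.toNat).length ≤ n := Nat.toDigits_length 2 i.toNat n hn hilt
  have htl : logic.toList = PySem.Chars.zfill (Nat.toDigits 2 i.toNat) (n : Int) := by
    rw [← heq]
    have htb : (PySem.Int.toBin i).toList = Nat.toDigits 2 i.toNat := by
      rw [PySem.Int.toList_toBin]
      simp only [PySem.Int.toBinChars]
      rw [if_neg (by omega)]
    simp [PySem.Str.zfill, htb]
  refine ⟨?_, ?_⟩
  · rw [htl, PySem.Chars.length_zfill]
    simp
    omega
  · rcases hd : Nat.toDigits 2 i.toNat with _ | ⟨c, rest⟩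
    · rw [hd] at hone; simp at hone
    · rw [hd] at hchars hone
      rw [htl, hd]
      exact pv_zfill_good c rest (n : Int) hchars hone

-- A's petal is the union filtered by B's signature test
set_option maxHeartbeats 1000000 in
theorem pv_petalA_filter (datasets : List (List String)) (logic : String)
    (hd : datasets ≠ []) (hg : pvGoodLogic datasets.length logic.toList) :
    pvPetalA datasets logic =
      (PySem.List.dedup datasets.flatten).filter (fun x => pvSigB datasets x == logic) := by
  obtain ⟨d0, rest, rfl⟩ : ∃ d0 rest, datasets = d0 :: rest := by
    cases datasets with
    | nil => exact absurd rfl hd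
    | cons a l => exact ⟨a, l, rfl⟩
  set datasets := d0 :: rest with hds
  set n := datasets.length with hn
  obtain ⟨hlen, hchars, hone⟩ := hg
  set L := logic.toList with hL
  have hrange := PySem.List.pyRange_zero_nat n
  have hget : ∀ k : Nat, k < n → PySem.Str.pyGet? logic (k : Int) = L[k]? := by
    intro k hk
    simp only [PySem.Str.pyGet?, PySem.Chars.pyGet?, PySem.List.pyGet?_natCast, hL]
  have hgetD : ∀ k : Nat, PySem.List.pyGetD datasets (k : Int) [] = datasets.getD k [] := by
    intro k; simp [PySem.List.pyGetD_natCast]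
  have hU : pvUnionAll datasets = PySem.List.dedup datasets.flatten := pv_unionAll_eq_dedup d0 rest
  set U := PySem.List.dedup datasets.flatten with hUdef
  obtain ⟨k1, hk1lt, hk1⟩ := List.mem_iff_getElem.mp hone
  have hk1n : k1 < n := by rw [← hlen]; exact hk1lt
  unfold pvPetalA
  simp only [← hn, hU, PySem.Set.inter, PySem.Set.diff]
  rw [List.filter_filter]
  apply List.filter_congr
  intro x hx
  set included := ((PySem.List.pyRange 0 (n : Int) 1).filter
      (fun i => PySem.Str.pyGet? logic i == some '1')).map
      (fun i => PySem.List.pyGetD datasets i []) with hinc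
  set excluded := ((PySem.List.pyRange 0 (n : Int) 1).filter
      (fun i => PySem.Str.pyGet? logic i == some '0')).map
      (fun i => PySem.List.pyGetD datasets i []) with hexc
  have hmem_inc : ∀ t, t ∈ included ↔ ∃ k, ∃ _ : k < n, L[k] = '1' ∧ t = datasets.getD k [] := by
    intro t
    rw [hinc, hrange, List.filter_map, List.map_map, List.mem_map]
    constructor
    · rintro ⟨k, hk, rfl⟩
      simp only [List.mem_filter, List.mem_range, Function.comp_apply] at hk
      obtain ⟨hklt, hkcond⟩ := hk
      rw [hget k hklt] at hkcond
      have : L[k]? = some '1' := by simpa using hkcond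
      have hkL : k < L.length := by rw [hlen]; exact hklt
      refine ⟨k, hklt, ?_, by simpa using (hgetD k).symm⟩
      rw [List.getElem?_eq_getElem hkL] at this
      exact Option.some.inj this
    · rintro ⟨k, hklt, hk1', rfl⟩
      refine ⟨k, ?_, by simpa using hgetD k⟩
      simp only [List.mem_filter, List.mem_range, Function.comp_apply]
      refine ⟨hklt, ?_⟩
      rw [hget k hklt]
      have hkL : k < L.length := by rw [hlen]; exact hklt
      simp [List.getElem?_eq_getElem hkL, hk1']
  have hmem_exc : ∀ t, t ∈ excluded ↔ ∃ k, ∃ _ : k < n, L[k] = '0' ∧ t = datasets.getD k [] := by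
    intro t
    rw [hexc, hrange, List.filter_map, List.map_map, List.mem_map]
    constructor
    · rintro ⟨k, hk, rfl⟩
      simp only [List.mem_filter, List.mem_range, Function.comp_apply] at hk
      obtain ⟨hklt, hkcond⟩ := hk
      rw [hget k hklt] at hkcond
      have : L[k]? = some '0' := by simpa using hkcond
      have hkL : k < L.length := by rw [hlen]; exact hklt
      refine ⟨k, hklt, ?_, by simpa using (hgetD k).symm⟩
      rw [List.getElem?_eq_getElem hkL] at this
      exact Option.some.inj this
    · rintro ⟨k, hklt, hk0, rfl⟩
      refine ⟨k, ?_, by simpa using hgetD k⟩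
      simp only [List.mem_filter, List.mem_range, Function.comp_apply]
      refine ⟨hklt, ?_⟩
      rw [hget k hklt]
      have hkL : k < L.length := by rw [hlen]; exact hklt
      simp [List.getElem?_eq_getElem hkL, hk0]
  have hincne : included ≠ [] := by
    intro hnil
    have : datasets.getD k1 [] ∈ included := by
      rw [hmem_inc]; exact ⟨k1, hk1n, hk1, rfl⟩
    rw [hnil] at this; simp at this
  obtain ⟨s0, srest, hsplit⟩ : ∃ s0 srest, included = s0 :: srest := by
    cases hi : included with
    | nil => exact absurd hi hincne
    | cons a l => exact ⟨a, l, rfl⟩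
  have hIc : PySem.Set.contains (pvInterAll included) x =
      decide (∀ k, ∀ _ : k < n, L[k] = '1' → x ∈ datasets.getD k []) := by
    rcases Bool.eq_false_or_eq_true (PySem.Set.contains (pvInterAll included) x) with hb | hb <;>
      rw [hb]
    · symm; rw [decide_eq_true_iff]
      have hxI : x ∈ pvInterAll included := (PySem.Set.contains_iff _ _).mp hb
      intro k hklt hk1'
      rw [hsplit, pv_mem_interAll, ← hsplit] at hxI
      exact hxI _ ((hmem_inc _).mpr ⟨k, hklt, hk1', rfl⟩)
    · symm; rw [decide_eq_false_iff_not]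
      intro hall
      have : x ∈ pvInterAll included := by
        rw [hsplit, pv_mem_interAll, ← hsplit]
        intro t ht
        obtain ⟨k, hklt, hk1', rfl⟩ := (hmem_inc t).mp ht
        exact hall k hklt hk1'
      rw [← PySem.Set.contains_iff] at this
      rw [hb] at this; exact absurd this (by simp)
  have hEc : PySem.Set.contains
      (excluded.foldl (fun a b => PySem.Set.union a b) PySem.Set.empty) x =
      decide (∃ k, ∃ _ : k < n, L[k] = '0' ∧ x ∈ datasets.getD k []) := by
    rcases Bool.eq_false_or_eq_true (PySem.Set.contains
        (excluded.foldl (fun a b => PySem.Set.union a b) PySem.Set.empty) x) with hb | hb <;>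
      rw [hb]
    · symm; rw [decide_eq_true_iff]
      have hxE := (PySem.Set.contains_iff _ _).mp hb
      rw [pv_mem_foldl_union_empty] at hxE
      obtain ⟨t, ht, hxt⟩ := hxE
      obtain ⟨k, hklt, hk0, rfl⟩ := (hmem_exc t).mp ht
      exact ⟨k, hklt, hk0, hxt⟩
    · symm; rw [decide_eq_false_iff_not]
      rintro ⟨k, hklt, hk0, hxk⟩
      have : x ∈ excluded.foldl (fun a b => PySem.Set.union a b) PySem.Set.empty := by
        rw [pv_mem_foldl_union_empty]
        exact ⟨_, (hmem_exc _).mpr ⟨k, hklt, hk0, rfl⟩, hxk⟩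
      rw [← PySem.Set.contains_iff] at this
      rw [hb] at this; exact absurd this (by simp)
  rw [hIc, hEc]
  have hkeyiff : pvSigB datasets x = logic ↔
      (∀ k, ∀ _ : k < n, (if x ∈ datasets.getD k [] then '1' else '0') = L[k]) := by
    constructor
    · intro heqs k hklt
      have hTL : ((List.range n).map
          ((fun i => if PySem.Set.contains (PySem.List.pyGetD datasets i []) x then '1' else '0')
            ∘ (fun j : Nat => (j : Int)))) = L := by
        have h2 := congrArg String.toList heqs
        unfold pvSigB at h2
        rw [← hn, hrange, List.map_map, String.toList_ofList] at h2
        rw [h2, hL]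
      have hk' := congrArg (fun l => l[k]?) hTL
      simp only [List.getElem?_map] at hk'
      have hkr : k < (List.range n).length := by simpa using hklt
      have hkL : k < L.length := by rw [hlen]; exact hklt
      rw [List.getElem?_eq_getElem hkr, List.getElem?_eq_getElem hkL] at hk'
      simp only [Option.map_some, List.getElem_range, Function.comp_apply] at hk'
      have hk'' := Option.some.inj hk'
      rw [hgetD k] at hk''
      by_cases hmem : x ∈ datasets.getD k []
      · rw [if_pos hmem]
        rw [if_pos ((PySem.Set.contains_iff _ _).mpr hmem)] at hk''
        exact hk''
      · rw [if_neg hmem]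
        rw [if_neg (show ¬ PySem.Set.contains (datasets.getD k []) x = true from
          fun hc => hmem ((PySem.Set.contains_iff _ _).mp hc))] at hk''
        exact hk''
    · intro hall
      unfold pvSigB
      rw [← hn, hrange, List.map_map]
      have hTL : ((List.range n).map
          ((fun i => if PySem.Set.contains (PySem.List.pyGetD datasets i []) x then '1' else '0')
            ∘ (fun j : Nat => (j : Int)))) = L := by
        apply List.ext_getElem
        · simp [hlen]
        · intro k hka hkb
          simp only [List.getElem_map, List.getElem_range, Function.comp_apply]
          have hklt : k < n := by simpa using hka
          rw [hgetD k]
          have := hall k hklt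
          by_cases hmem : x ∈ datasets.getD k []
          · rw [if_pos hmem] at this
            rw [if_pos ((PySem.Set.contains_iff _ _).mpr hmem)]
            exact this
          · rw [if_neg hmem] at this
            rw [if_neg (show ¬ PySem.Set.contains (datasets.getD k []) x = true from
              fun hc => hmem ((PySem.Set.contains_iff _ _).mp hc))]
            exact this
      rw [hTL, hL, String.ofList_toList]
  have hkey : (pvSigB datasets x == logic) =
      decide (∀ k, ∀ _ : k < n,
        (if x ∈ datasets.getD k [] then '1' else '0') = L[k]) := by
    rw [Bool.eq_iff_iff]
    simp only [beq_iff_eq, decide_eq_true_eq]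
    exact hkeyiff
  rw [hkey]
  have h1 : (∀ k, ∀ _ : k < n, (if x ∈ datasets.getD k [] then '1' else '0') = L[k]) ↔
      ((∀ k, ∀ _ : k < n, L[k] = '1' → x ∈ datasets.getD k []) ∧
        ¬ ∃ k, ∃ _ : k < n, L[k] = '0' ∧ x ∈ datasets.getD k []) := by
    constructor
    · intro hyes
      refine ⟨?_, ?_⟩
      · intro k hklt hk1'
        have hthis := hyes k hklt
        rw [hk1'] at hthis
        by_contra hcon
        rw [if_neg hcon] at hthis
        exact absurd hthis (by decide)
      · rintro ⟨k, hklt, hk0, hxk⟩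
        have hthis := hyes k hklt
        rw [hk0, if_pos hxk] at hthis
        exact absurd hthis (by decide)
    · rintro ⟨h1', h0'⟩ k hklt
      have hkL : k < L.length := by rw [hlen]; exact hklt
      rcases hchars L[k] (List.getElem_mem hkL) with hc | hc
      · rw [hc, if_neg (fun hxk => h0' ⟨k, hklt, hc, hxk⟩)]
      · rw [hc, if_pos (h1' k hklt hc)]
  rw [decide_eq_decide.mpr h1]
  by_cases hI : (∀ k, ∀ _ : k < n, L[k] = '1' → x ∈ datasets.getD k [])
  · by_cases hE : (∃ k, ∃ _ : k < n, L[k] = '0' ∧ x ∈ datasets.getD k [])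
    · rw [decide_eq_true hI, decide_eq_true hE,
        decide_eq_false (show ¬ _ from fun h => h.2 hE)]
      rfl
    · rw [decide_eq_true hI, decide_eq_false hE, decide_eq_true ⟨hI, hE⟩]
      rfl
  · by_cases hE : (∃ k, ∃ _ : k < n, L[k] = '0' ∧ x ∈ datasets.getD k [])
    · rw [decide_eq_true hE, decide_eq_false hI,
        decide_eq_false (show ¬ _ from fun h => hI h.1)]
      rfl
    · rw [decide_eq_false hE, decide_eq_false hI,
        decide_eq_false (show ¬ _ from fun h => hI h.1)]
      rfl


-- ===== B-side lemmas: the enumerate fold, characterised =====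

theorem pv_stepB_snd_mem (logic : String) (l : List (Int × List String)) :
    ∀ (st : Option (PySem.Set String) × PySem.Set String) (x : String),
      x ∈ (l.foldl (pvStepB logic) st).2 ↔
        x ∈ st.2 ∨ ∃ p ∈ l, ¬ (PySem.Str.pyGet? logic p.1 == some '1') = true ∧ x ∈ p.2 := by
  induction l with
  | nil => intro st x; simp
  | cons p rest ih =>
    intro st x
    rw [List.foldl_cons]
    by_cases hc : (PySem.Str.pyGet? logic p.1 == some '1') = true
    · have hstep : pvStepB logic st p =
          (some (match st.1 with | none => p.2 | some s => PySem.Set.inter s p.2), st.2) := by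
        rw [pvStepB, if_pos hc]
      rw [hstep, ih]
      simp only [List.mem_cons]
      constructor
      · rintro (h | ⟨q, hq, hnc, hxq⟩)
        · exact Or.inl h
        · exact Or.inr ⟨q, Or.inr hq, hnc, hxq⟩
      · rintro (h | ⟨q, hq | hq, hnc, hxq⟩)
        · exact Or.inl h
        · subst hq; exact absurd hc hnc
        · exact Or.inr ⟨q, hq, hnc, hxq⟩
    · have hstep : pvStepB logic st p = (st.1, PySem.Set.union st.2 p.2) := by
        rw [pvStepB, if_neg hc]
      rw [hstep, ih]
      simp only [PySem.Set.mem_union, List.mem_cons]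
      constructor
      · rintro ((h | h) | ⟨q, hq, hnc, hxq⟩)
        · exact Or.inl h
        · exact Or.inr ⟨p, Or.inl rfl, hc, h⟩
        · exact Or.inr ⟨q, Or.inr hq, hnc, hxq⟩
      · rintro (h | ⟨q, hq | hq, hnc, hxq⟩)
        · exact Or.inl (Or.inl h)
        · subst hq; exact Or.inl (Or.inr hxq)
        · exact Or.inr ⟨q, hq, hnc, hxq⟩

theorem pv_stepB_fst_some (logic : String) (l : List (Int × List String)) :
    ∀ (st : Option (PySem.Set String) × PySem.Set String) (s0 : PySem.Set String),
      st.1 = some s0 →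
      ∃ s', (l.foldl (pvStepB logic) st).1 = some s' ∧
        ∀ x, (x ∈ s' ↔ x ∈ s0 ∧
          ∀ p ∈ l, (PySem.Str.pyGet? logic p.1 == some '1') = true → x ∈ p.2) := by
  induction l with
  | nil =>
    intro st s0 h
    exact ⟨s0, h, fun x => by simp⟩
  | cons p rest ih =>
    intro st s0 h
    rw [List.foldl_cons]
    by_cases hc : (PySem.Str.pyGet? logic p.1 == some '1') = true
    · have hstep : pvStepB logic st p = (some (PySem.Set.inter s0 p.2), st.2) := by
        rw [pvStepB, if_pos hc, h]
      rw [hstep]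
      obtain ⟨s', h1, h2⟩ := ih (some (PySem.Set.inter s0 p.2), st.2) (PySem.Set.inter s0 p.2) rfl
      refine ⟨s', h1, fun x => ?_⟩
      rw [h2 x, PySem.Set.mem_inter]
      constructor
      · rintro ⟨⟨hs0, hp⟩, hrest⟩
        refine ⟨hs0, fun q hq hcq => ?_⟩
        rcases List.mem_cons.mp hq with hq | hq
        · subst hq; exact hp
        · exact hrest q hq hcq
      · rintro ⟨hs0, hall⟩
        exact ⟨⟨hs0, hall p (by simp) hc⟩, fun q hq hcq => hall q (by simp [hq]) hcq⟩
    · have hstep : pvStepB logic st p = (st.1, PySem.Set.union st.2 p.2) := by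
        rw [pvStepB, if_neg hc]
      rw [hstep]
      obtain ⟨s', h1, h2⟩ := ih (st.1, PySem.Set.union st.2 p.2) s0 h
      refine ⟨s', h1, fun x => ?_⟩
      rw [h2 x]
      constructor
      · rintro ⟨hs0, hall⟩
        refine ⟨hs0, fun q hq hcq => ?_⟩
        rcases List.mem_cons.mp hq with hq | hq
        · subst hq; exact absurd hcq hc
        · exact hall q hq hcq
      · rintro ⟨hs0, hall⟩
        exact ⟨hs0, fun q hq hcq => hall q (by simp [hq]) hcq⟩

theorem pv_stepB_fst_none (logic : String) (l : List (Int × List String)) :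
    ∀ (e s' : PySem.Set String),
      (l.foldl (pvStepB logic) (none, e)).1 = some s' →
      ∀ x, (x ∈ s' ↔ ∀ p ∈ l, (PySem.Str.pyGet? logic p.1 == some '1') = true → x ∈ p.2) := by
  induction l with
  | nil => intro e s' h; simp at h
  | cons p rest ih =>
    intro e s' h x
    rw [List.foldl_cons] at h
    by_cases hc : (PySem.Str.pyGet? logic p.1 == some '1') = true
    · have hstep : pvStepB logic (none, e) p = (some p.2, e) := by
        rw [pvStepB, if_pos hc]
      rw [hstep] at h
      obtain ⟨s'', h1, h2⟩ := pv_stepB_fst_some logic rest (some p.2, e) p.2 rfl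
      rw [h1] at h
      obtain rfl : s'' = s' := Option.some.inj h
      rw [h2 x]
      constructor
      · rintro ⟨hp, hall⟩ q hq hcq
        rcases List.mem_cons.mp hq with hq | hq
        · subst hq; exact hp
        · exact hall q hq hcq
      · intro hall
        exact ⟨hall p (by simp) hc, fun q hq hcq => hall q (by simp [hq]) hcq⟩
    · have hstep : pvStepB logic (none, e) p = (none, PySem.Set.union e p.2) := by
        rw [pvStepB, if_neg hc]
      rw [hstep] at h
      rw [ih _ _ h x]
      constructor
      · intro hall q hq hcq
        rcases List.mem_cons.mp hq with hq | hq
        · subst hq; exact absurd hcq hc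
        · exact hall q hq hcq
      · intro hall q hq hcq
        exact hall q (by simp [hq]) hcq

theorem pv_stepB_fst_isSome (logic : String) (l : List (Int × List String)) :
    ∀ (st : Option (PySem.Set String) × PySem.Set String),
      (∃ p ∈ l, (PySem.Str.pyGet? logic p.1 == some '1') = true) →
      ∃ s', (l.foldl (pvStepB logic) st).1 = some s' := by
  induction l with
  | nil => intro st h; simp at h
  | cons p rest ih =>
    intro st h
    rw [List.foldl_cons]
    by_cases hc : (PySem.Str.pyGet? logic p.1 == some '1') = true
    · have h1 : ∃ s0, (pvStepB logic st p).1 = some s0 := by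
        rw [pvStepB, if_pos hc]
        exact ⟨_, rfl⟩
      obtain ⟨s0, h1⟩ := h1
      obtain ⟨s', h2, _⟩ := pv_stepB_fst_some logic rest _ s0 h1
      exact ⟨s', h2⟩
    · obtain ⟨q, hq, hcq⟩ := h
      rcases List.mem_cons.mp hq with hq | hq
      · subst hq; exact absurd hcq hc
      · exact ih (pvStepB logic st p) ⟨q, hq, hcq⟩

-- a logic label that no union element's signature matches names an empty petal
theorem pv_not_mem_present (datasets : List (List String)) (logic : String)
    (hc : PySem.Set.contains (pvPresent datasets) logic = false) :
    ¬ ∃ x ∈ pvUnionAll datasets, logic = pvSigB datasets x := by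
  intro hex
  have hmem : logic ∈ pvPresent datasets := by
    unfold pvPresent
    rw [PySem.Set.mem_foldl_add]
    exact Or.inr hex
  rw [← PySem.Set.contains_iff] at hmem
  rw [hc] at hmem
  exact absurd hmem (by simp)

-- B's petal is the same filter of the union as A's
set_option maxHeartbeats 1000000 in
theorem pv_petalB_filter (datasets : List (List String)) (logic : String)
    (hd : datasets ≠ []) (hg : pvGoodLogic datasets.length logic.toList) :
    pvPetalB datasets logic =
      (PySem.List.dedup datasets.flatten).filter (fun x => pvSigB datasets x == logic) := by
  obtain ⟨d0, rest, rfl⟩ : ∃ d0 rest, datasets = d0 :: rest := by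
    cases datasets with
    | nil => exact absurd rfl hd
    | cons a l => exact ⟨a, l, rfl⟩
  set datasets := d0 :: rest with hds
  set n := datasets.length with hn
  obtain ⟨hlen, hchars, hone⟩ := hg
  set L := logic.toList with hL
  have hget : ∀ k : Nat, k < n → PySem.Str.pyGet? logic (k : Int) = L[k]? := by
    intro k hk
    simp only [PySem.Str.pyGet?, PySem.Chars.pyGet?, PySem.List.pyGet?_natCast, hL]
  have hgetD : ∀ k : Nat, PySem.List.pyGetD datasets (k : Int) [] = datasets.getD k [] := by
    intro k; simp [PySem.List.pyGetD_natCast]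
  have hU : pvUnionAll datasets = PySem.List.dedup datasets.flatten := pv_unionAll_eq_dedup d0 rest
  set U := PySem.List.dedup datasets.flatten with hUdef
  obtain ⟨k1, hk1lt, hk1⟩ := List.mem_iff_getElem.mp hone
  have hk1n : k1 < n := by rw [← hlen]; exact hk1lt
  -- the '1' at k1 makes the inter accumulator a some
  have hcond : ∀ k : Nat, ∀ _ : k < n,
      (PySem.Str.pyGet? logic ((0 : Int) + (k : Int)) == some '1') = decide (L[k]'(by omega) = '1') := by
    intro k hk
    rw [zero_add, hget k hk]
    have hkL : k < L.length := by rw [hlen]; exact hk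
    rw [List.getElem?_eq_getElem hkL]
    by_cases hb : L[k]'(by omega) = '1' <;> simp [hb]
  have hmem_enum : ∀ p, p ∈ PySem.List.enumerate datasets ↔
      ∃ (k : Nat), ∃ _ : k < n, p = ((0 : Int) + (k : Int), datasets[k]'(by omega)) := by
    intro p
    rw [PySem.List.mem_enumerate_iff]
  have hsome : ∃ s', ((PySem.List.enumerate datasets).foldl (pvStepB logic)
      (none, PySem.Set.empty)).1 = some s' := by
    apply pv_stepB_fst_isSome
    refine ⟨((0 : Int) + (k1 : Int), datasets[k1]'(by omega)), ?_, ?_⟩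
    · rw [hmem_enum]; exact ⟨k1, hk1n, rfl⟩
    · rw [hcond k1 hk1n]
      simp [hk1]
  obtain ⟨s', hs'⟩ := hsome
  have hmemI : ∀ x, x ∈ s' ↔
      ∀ k, ∀ _ : k < n, L[k] = '1' → x ∈ datasets.getD k [] := by
    intro x
    rw [pv_stepB_fst_none logic (PySem.List.enumerate datasets) PySem.Set.empty s' hs' x]
    constructor
    · intro hall k hk hk1'
      have hp := hall ((0 : Int) + (k : Int), datasets[k]'(by omega)) ((hmem_enum _).mpr ⟨k, hk, rfl⟩)
      rw [hcond k hk] at hp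
      have := hp (by simp [hk1'])
      rwa [List.getD_eq_getElem _ _ (by omega)]
    · intro hall p hp hcp
      obtain ⟨k, hk, rfl⟩ := (hmem_enum p).mp hp
      rw [hcond k hk, decide_eq_true_eq] at hcp
      have := hall k hk hcp
      rwa [List.getD_eq_getElem _ _ (by omega)] at this
  have hmemE : ∀ x, x ∈ ((PySem.List.enumerate datasets).foldl (pvStepB logic)
      (none, PySem.Set.empty)).2 ↔
      ∃ k, ∃ _ : k < n, L[k] = '0' ∧ x ∈ datasets.getD k [] := by
    intro x
    rw [pv_stepB_snd_mem logic (PySem.List.enumerate datasets) (none, PySem.Set.empty) x]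
    constructor
    · rintro (h | ⟨p, hp, hnc, hxp⟩)
      · simp [PySem.Set.empty] at h
      · obtain ⟨k, hk, rfl⟩ := (hmem_enum p).mp hp
        rw [hcond k hk] at hnc
        have hkL : k < L.length := by rw [hlen]; exact hk
        have h0 : L[k] = '0' := by
          rcases hchars L[k] (List.getElem_mem hkL) with h | h
          · exact h
          · exact absurd (by simp [h]) hnc
        refine ⟨k, hk, h0, ?_⟩
        rwa [List.getD_eq_getElem _ _ (by omega)]
    · rintro ⟨k, hk, hk0, hxk⟩
      refine Or.inr ⟨((0 : Int) + (k : Int), datasets[k]'(by omega)), (hmem_enum _).mpr ⟨k, hk, rfl⟩, ?_, ?_⟩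
      · rw [hcond k hk]
        simp [hk0]
      · rwa [List.getD_eq_getElem _ _ (by omega)] at hxk
  -- reduce pvPetalB to the diff-of-inter form
  show pvPetalB datasets logic = _
  rw [pvPetalB]
  rw [hs']
  simp only [hU]
  simp only [PySem.Set.inter, PySem.Set.diff]
  rw [List.filter_filter]
  apply List.filter_congr
  intro x hx
  have hIc : PySem.Set.contains s' x =
      decide (∀ k, ∀ _ : k < n, L[k] = '1' → x ∈ datasets.getD k []) := by
    rcases Bool.eq_false_or_eq_true (PySem.Set.contains s' x) with hb | hb <;> rw [hb]
    · symm; rw [decide_eq_true_iff]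
      exact (hmemI x).mp ((PySem.Set.contains_iff _ _).mp hb)
    · symm; rw [decide_eq_false_iff_not]
      intro hall
      have hmem := (hmemI x).mpr hall
      rw [← PySem.Set.contains_iff] at hmem
      rw [hb] at hmem; exact absurd hmem (by simp)
  have hEc : PySem.Set.contains ((PySem.List.enumerate datasets).foldl (pvStepB logic)
        (none, PySem.Set.empty)).2 x =
      decide (∃ k, ∃ _ : k < n, L[k] = '0' ∧ x ∈ datasets.getD k []) := by
    rcases Bool.eq_false_or_eq_true (PySem.Set.contains ((PySem.List.enumerate datasets).foldl
        (pvStepB logic) (none, PySem.Set.empty)).2 x) with hb | hb <;> rw [hb]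
    · symm; rw [decide_eq_true_iff]
      exact (hmemE x).mp ((PySem.Set.contains_iff _ _).mp hb)
    · symm; rw [decide_eq_false_iff_not]
      intro hex
      have hmem := (hmemE x).mpr hex
      rw [← PySem.Set.contains_iff] at hmem
      rw [hb] at hmem; exact absurd hmem (by simp)
  rw [hIc, hEc]
  have hkeyiff : pvSigB datasets x = logic ↔
      (∀ k, ∀ _ : k < n, (if x ∈ datasets.getD k [] then '1' else '0') = L[k]) := by
    have hrange := PySem.List.pyRange_zero_nat n
    constructor
    · intro heqs k hklt
      have hTL : ((List.range n).map
          ((fun i => if PySem.Set.contains (PySem.List.pyGetD datasets i []) x then '1' else '0')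
            ∘ (fun j : Nat => (j : Int)))) = L := by
        have h2 := congrArg String.toList heqs
        unfold pvSigB at h2
        rw [← hn, hrange, List.map_map, String.toList_ofList] at h2
        rw [h2, hL]
      have hk' := congrArg (fun l => l[k]?) hTL
      simp only [List.getElem?_map] at hk'
      have hkr : k < (List.range n).length := by simpa using hklt
      have hkL : k < L.length := by rw [hlen]; exact hklt
      rw [List.getElem?_eq_getElem hkr, List.getElem?_eq_getElem hkL] at hk'
      simp only [Option.map_some, List.getElem_range, Function.comp_apply] at hk'
      have hk'' := Option.some.inj hk'
      rw [hgetD k] at hk''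
      by_cases hmem : x ∈ datasets.getD k []
      · rw [if_pos hmem]
        rw [if_pos ((PySem.Set.contains_iff _ _).mpr hmem)] at hk''
        exact hk''
      · rw [if_neg hmem]
        rw [if_neg (show ¬ PySem.Set.contains (datasets.getD k []) x = true from
          fun hc => hmem ((PySem.Set.contains_iff _ _).mp hc))] at hk''
        exact hk''
    · intro hall
      unfold pvSigB
      rw [← hn, hrange, List.map_map]
      have hTL : ((List.range n).map
          ((fun i => if PySem.Set.contains (PySem.List.pyGetD datasets i []) x then '1' else '0')
            ∘ (fun j : Nat => (j : Int)))) = L := by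
        apply List.ext_getElem
        · simp [hlen]
        · intro k hka hkb
          simp only [List.getElem_map, List.getElem_range, Function.comp_apply]
          have hklt : k < n := by simpa using hka
          rw [hgetD k]
          have := hall k hklt
          by_cases hmem : x ∈ datasets.getD k []
          · rw [if_pos hmem] at this
            rw [if_pos ((PySem.Set.contains_iff _ _).mpr hmem)]
            exact this
          · rw [if_neg hmem] at this
            rw [if_neg (show ¬ PySem.Set.contains (datasets.getD k []) x = true from
              fun hc => hmem ((PySem.Set.contains_iff _ _).mp hc))]
            exact this
      rw [hTL, hL, String.ofList_toList]
  have hkey : (pvSigB datasets x == logic) =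
      decide (∀ k, ∀ _ : k < n,
        (if x ∈ datasets.getD k [] then '1' else '0') = L[k]) := by
    rw [Bool.eq_iff_iff]
    simp only [beq_iff_eq, decide_eq_true_eq]
    exact hkeyiff
  rw [hkey]
  have h1 : (∀ k, ∀ _ : k < n, (if x ∈ datasets.getD k [] then '1' else '0') = L[k]) ↔
      ((∀ k, ∀ _ : k < n, L[k] = '1' → x ∈ datasets.getD k []) ∧
        ¬ ∃ k, ∃ _ : k < n, L[k] = '0' ∧ x ∈ datasets.getD k []) := by
    constructor
    · intro hyes
      refine ⟨?_, ?_⟩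
      · intro k hklt hk1'
        have hthis := hyes k hklt
        rw [hk1'] at hthis
        by_contra hcon
        rw [if_neg hcon] at hthis
        exact absurd hthis (by decide)
      · rintro ⟨k, hklt, hk0, hxk⟩
        have hthis := hyes k hklt
        rw [hk0, if_pos hxk] at hthis
        exact absurd hthis (by decide)
    · rintro ⟨h1', h0'⟩ k hklt
      have hkL : k < L.length := by rw [hlen]; exact hklt
      rcases hchars L[k] (List.getElem_mem hkL) with hc | hc
      · rw [hc, if_neg (fun hxk => h0' ⟨k, hklt, hc, hxk⟩)]
      · rw [hc, if_pos (h1' k hklt hc)]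
  rw [decide_eq_decide.mpr h1]
  by_cases hI : (∀ k, ∀ _ : k < n, L[k] = '1' → x ∈ datasets.getD k [])
  · by_cases hE : (∃ k, ∃ _ : k < n, L[k] = '0' ∧ x ∈ datasets.getD k [])
    · rw [decide_eq_true hI, decide_eq_true hE,
        decide_eq_false (show ¬ _ from fun h => h.2 hE)]
      rfl
    · rw [decide_eq_true hI, decide_eq_false hE, decide_eq_true ⟨hI, hE⟩]
      rfl
  · by_cases hE : (∃ k, ∃ _ : k < n, L[k] = '0' ∧ x ∈ datasets.getD k [])
    · rw [decide_eq_true hE, decide_eq_false hI,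
        decide_eq_false (show ¬ _ from fun h => hI h.1)]
      rfl
    · rw [decide_eq_false hE, decide_eq_false hI,
        decide_eq_false (show ¬ _ from fun h => hI h.1)]
      rfl

-- ===== VERDICT (by name: the statement is the Claim_ definition above) =====
theorem generate_petal_labels_spec : Claim_equal_generate_petal_labels := by
  intro datasets _ hpre
  unfold Spec_generate_petal_labels generate_petal_labels generate_petal_labels_alt
  congr 1
  rw [pvLogics, List.foldl_map]
  apply PySem.List.foldl_congr_mem
  intro acc i hi
  dsimp only
  congr 1
  set logic := PySem.Str.zfill (PySem.Int.toBin i) ((datasets.length : Nat) : Int) with hlg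
  have hmem : logic ∈ pvLogics datasets.length := by
    rw [pvLogics]
    exact List.mem_map_of_mem hi
  have hgood := pv_good_of_mem_logics datasets.length logic hmem
  cases hc : PySem.Set.contains (pvPresent datasets) logic
  · rw [if_neg (by exact Bool.false_ne_true)]
    rw [pv_petalA_filter datasets logic hpre hgood]
    have hnone : ∀ a ∈ PySem.List.dedup datasets.flatten,
        ¬(pvSigB datasets a == logic) = true := by
      intro x hx hbeq
      apply pv_not_mem_present datasets logic hc
      obtain ⟨d0, rest, rfl⟩ : ∃ d0 rest, datasets = d0 :: rest := by
        cases datasets with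
        | nil => exact absurd rfl hpre
        | cons a l => exact ⟨a, l, rfl⟩
      rw [pv_unionAll_eq_dedup]
      exact ⟨x, hx, (eq_of_beq hbeq).symm⟩
    rw [List.filter_eq_nil_iff.mpr hnone]
    rfl
  · rw [if_pos (by exact rfl)]
    rw [pv_petalA_filter datasets logic hpre hgood, pv_petalB_filter datasets logic hpre hgood]
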